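-- pv_equiv track=rewrite | github.com/LogFold/LogFold | example/compressed/decompress/decompress_dynamic_ids.py | decompress_buffer
-- ===== SOURCE A (Python) =====
-- def read_uleb128(data):
--     """
--     从字节数据中读取无符号 LEB128 编码的整数
--     返回 (解析出的整数, 消耗的字节数)
--     """
--     value = 0
--     shift = 0
--     bytes_consumed = 0
--
--     for byte in data:
--         # 转换为无符号整数
--         byte_val = byte
--         # 取低7位
--         value |= (byte_val & 0x7F) << shift
--         shift += 7
--         bytes_consumed += 1
--
--         # 检查最高位是否为0（表示结束）
--         if (byte_val & 0x80) == 0: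
--             break
--
--     return value, bytes_consumed
--
-- def decompress_buffer(data):
--     """
--     解压缩符合 Rust LEB128 编码的数据
--     返回解压出的整数列表
--     """
--     values = []
--     index = 0
--     total_length = len(data)
--
--     while index < total_length:
--         value, consumed = read_uleb128(data[index:])
--         values.append(value)
--         index += consumed
--
--     return values
-- ===== SOURCE B (Python) =====
-- def decompress_buffer(data):
--     """Single-pass ULEB128 decoder: one loop over all bytes, no slicing."""
--     values = []
--     value = 0
--     shift = 0
--     in_progress = False
--     for byte in data:
--         value |= (byte & 0x7F) << shift
--         shift += 7
--         in_progress = True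
--         if (byte & 0x80) == 0:
--             values.append(value)
--             value = 0
--             shift = 0
--             in_progress = False
--     if in_progress:
--         values.append(value)
--     return values
-- ===== Notes on version B (the rewrite author's own statement) =====
-- stated objective: simpler
-- what changed: Replaced the outer while-with-index-and-slice plus inner read_uleb128 helper by one single for loop over all bytes that keeps value/shift/in_progress and emits a value at each terminator byte (plus a trailing partial value).
import Mathlib
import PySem

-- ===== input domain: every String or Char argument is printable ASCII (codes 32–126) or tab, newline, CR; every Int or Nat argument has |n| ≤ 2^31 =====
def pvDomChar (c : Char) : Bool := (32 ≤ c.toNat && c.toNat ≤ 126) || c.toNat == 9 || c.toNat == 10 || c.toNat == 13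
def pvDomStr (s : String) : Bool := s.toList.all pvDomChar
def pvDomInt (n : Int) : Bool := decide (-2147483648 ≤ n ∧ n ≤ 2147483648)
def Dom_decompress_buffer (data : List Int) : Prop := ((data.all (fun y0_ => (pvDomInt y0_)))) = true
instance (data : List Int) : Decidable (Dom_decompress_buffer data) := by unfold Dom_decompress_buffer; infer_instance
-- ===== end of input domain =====

-- B replaces A's outer while-with-slicing plus read_uleb128 helper by one single
-- fold over all bytes keeping (values, value, shift, in_progress): simpler, one pass.


-- ===== PORT A =====
-- read_uleb128's for-loop with break, as structural recursion over the remaining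
-- bytes carrying (value, shift); consumed is returned as a Nat count and cast to
-- Int in read_uleb128 (Python's bytes_consumed counter).
def readGo (l : List Int) (v : Int) (s : Nat) : Int × Nat :=
  match l with
  | [] => (v, 0)
  | b :: rest =>
    let v' := PySem.Int.bor v (PySem.Int.band b 127 <<< s)
    if PySem.Int.band b 128 = 0 then (v', 1)
    else ((readGo rest v' (s + 7)).1, (readGo rest v' (s + 7)).2 + 1)

def read_uleb128 (data : List Int) : Int × Int :=
  ((readGo data 0 0).1, ((readGo data 0 0).2 : Int))

theorem readGo_snd_pos (b : Int) (rest : List Int) (v : Int) (s : Nat) :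
    1 ≤ (readGo (b :: rest) v s).2 := by
  simp only [readGo]
  split <;> simp

-- A's while loop: 'index < total' with 'index += consumed', i.e. recursion on the
-- suffix data[index:] (here: the list with consumed bytes dropped).
def loopA (l : List Int) : List Int :=
  match l with
  | [] => []
  | b :: rest =>
    let vc := read_uleb128 (b :: rest)
    vc.1 :: loopA ((b :: rest).drop vc.2.toNat)
termination_by l.length
decreasing_by
  have h1 : 1 ≤ (readGo (b :: rest) 0 0).2 := readGo_snd_pos b rest 0 0
  simp [read_uleb128, List.length_drop]
  omega

def decompress_buffer (data : List Int) : List Int := loopA data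

-- ===== PORT B =====
-- one step of B's single for loop: state (values, value, shift, in_progress)
def stepB (st : List Int × Int × Nat × Bool) (b : Int) : List Int × Int × Nat × Bool :=
  let v' := PySem.Int.bor st.2.1 (PySem.Int.band b 127 <<< st.2.2.1)
  if PySem.Int.band b 128 = 0 then (st.1 ++ [v'], 0, 0, false)
  else (st.1, v', st.2.2.1 + 7, true)

def decompress_buffer_alt (data : List Int) : List Int :=
  let st := data.foldl stepB ([], 0, 0, false)
  if st.2.2.2 then st.1 ++ [st.2.1] else st.1

-- ===== PRECONDITION & SPEC =====
def Spec_decompress_buffer (data : List Int) (out : List Int) : Prop := out = decompress_buffer_alt data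
instance (data : List Int) (out : List Int) : Decidable (Spec_decompress_buffer data out) := by unfold Spec_decompress_buffer; infer_instance

-- ===== CLAIM (what is proved, stated in full; the proofs are below) =====
def Claim_equal_decompress_buffer : Prop := ∀ (data : List Int), Dom_decompress_buffer data → Spec_decompress_buffer data (decompress_buffer data)

-- ===== LEMMAS AND PROOFS =====

-- how A continues from mid-group state (value v, shift s, in-progress flag p)
def contA (l : List Int) (v : Int) (s : Nat) (p : Bool) : List Int :=
  match l with
  | [] => if p then [v] else []
  | _ :: _ => (readGo l v s).1 :: loopA (l.drop (readGo l v s).2)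

theorem loopA_nil : loopA [] = [] := by rw [loopA.eq_def]

theorem loopA_cons (b : Int) (rest : List Int) :
    loopA (b :: rest) =
      (readGo (b :: rest) 0 0).1 :: loopA ((b :: rest).drop (readGo (b :: rest) 0 0).2) := by
  rw [loopA.eq_def]
  simp [read_uleb128]

theorem foldB_contA (l : List Int) : ∀ (acc : List Int) (v : Int) (s : Nat) (p : Bool),
    (let st := l.foldl stepB (acc, v, s, p);
     if st.2.2.2 then st.1 ++ [st.2.1] else st.1) = acc ++ contA l v s p := by
  induction l with
  | nil =>
    intro acc v s p
    cases p <;> simp [contA]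
  | cons b rest ih =>
    intro acc v s p
    by_cases hb : PySem.Int.band b 128 = 0
    · have hstep : stepB (acc, v, s, p) b
          = (acc ++ [PySem.Int.bor v (PySem.Int.band b 127 <<< s)], 0, 0, false) := by
        simp [stepB, hb]
      have hgo : readGo (b :: rest) v s
          = (PySem.Int.bor v (PySem.Int.band b 127 <<< s), 1) := by
        simp [readGo, hb]
      rw [List.foldl_cons, hstep, ih]
      cases rest with
      | nil => simp [contA, hgo, loopA_nil]
      | cons c cs =>
        simp only [contA, hgo, List.drop_succ_cons, List.drop_zero, List.append_assoc,
          List.singleton_append]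
        rw [loopA_cons]
    · have hstep : stepB (acc, v, s, p) b
          = (acc, PySem.Int.bor v (PySem.Int.band b 127 <<< s), s + 7, true) := by
        simp [stepB, hb]
      have hgo : readGo (b :: rest) v s
          = ((readGo rest (PySem.Int.bor v (PySem.Int.band b 127 <<< s)) (s + 7)).1,
             (readGo rest (PySem.Int.bor v (PySem.Int.band b 127 <<< s)) (s + 7)).2 + 1) := by
        simp [readGo, hb]
      rw [List.foldl_cons, hstep, ih]
      cases rest with
      | nil => simp [contA, readGo, loopA_nil]
      | cons c cs =>
        simp [contA, hgo, List.drop_succ_cons]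

-- ===== VERDICT (by name: the statement is the Claim_ definition above) =====
theorem decompress_buffer_spec : Claim_equal_decompress_buffer := by
  intro data _
  unfold Spec_decompress_buffer decompress_buffer decompress_buffer_alt
  have h := foldB_contA data [] 0 0 false
  simp only [List.nil_append] at h
  rw [h]
  cases data with
  | nil => simp [contA, loopA_nil]
  | cons b rest => rw [loopA_cons]; rfl
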